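-- pv_equiv track=rewrite | github.com/devesh950/OmniCare-AI--Unified-Help-Across-Research-Educations-Healthcare | agents/accessibility_agent.py | _add_reading_order
-- ===== SOURCE A (Python) =====
-- def _add_reading_order(text: str) -> str:
--     """Add semantic reading order hints"""
--     # Add section markers for screen readers
--     sections = text.split('\n## ')
--
--     if len(sections) > 1:
--         readable_sections = [sections[0]]  # Keep intro
--         for i, section in enumerate(sections[1:], 1):
--             readable_sections.append(f"\n## Section {i}: {section}")
--         return ''.join(readable_sections)
--
--     return text
-- ===== SOURCE B (Python) =====
-- def _add_reading_order(text: str) -> str: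
--     """Add semantic reading order hints (line-based single pass)."""
--     lines = text.split('\n')
--     out = [lines[0]]
--     count = 0
--     for line in lines[1:]:
--         if line.startswith('## '):
--             count += 1
--             out.append(f"## Section {count}: {line[3:]}")
--         else:
--             out.append(line)
--     return '\n'.join(out)
-- ===== Notes on version B (the rewrite author's own statement) =====
-- stated objective: alternative
-- what changed: Instead of splitting the text on the four-character newline-plus-heading-marker delimiter and re-gluing the pieces with numbered headers, B splits into individual lines, renumbers in a single pass every non-first line that begins with the heading marker, and joins the lines back with newlines.
import Mathlib
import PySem

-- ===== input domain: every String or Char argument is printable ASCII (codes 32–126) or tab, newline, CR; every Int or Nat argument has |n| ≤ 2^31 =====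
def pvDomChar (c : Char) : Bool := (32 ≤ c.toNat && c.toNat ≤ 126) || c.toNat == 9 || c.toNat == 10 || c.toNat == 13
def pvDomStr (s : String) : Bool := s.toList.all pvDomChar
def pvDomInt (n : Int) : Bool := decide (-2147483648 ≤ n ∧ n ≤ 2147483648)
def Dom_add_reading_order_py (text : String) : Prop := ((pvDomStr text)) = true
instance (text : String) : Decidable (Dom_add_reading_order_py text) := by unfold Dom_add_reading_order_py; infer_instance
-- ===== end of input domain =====

-- B renumbers heading-marker lines in a single line-based pass instead of splitting on the
-- four-character section delimiter and re-gluing numbered sections (alternative decomposition, same result).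

-- ===== PORT A =====
-- f-string "\n## Section {i}: {section}" at char-list level (str(i) = PySem.Int.toChars)
def pvHeaderA (i : Int) (section_ : List Char) : List Char :=
  ['\n', '#', '#', ' ', 'S', 'e', 'c', 't', 'i', 'o', 'n', ' '] ++ PySem.Int.toChars i
    ++ [':', ' '] ++ section_

def add_reading_order_py (text : String) : String :=
  let sections := PySem.Chars.splitOn text.toList ['\n', '#', '#', ' ']
  if sections.length > 1 then
    -- sections[0]: splitOn never returns [], so headD is exact here
    let readable := [sections.headD []]
    let readable := (PySem.List.enumerate (sections.drop 1) 1).foldl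
      (fun acc p => acc ++ [pvHeaderA p.1 p.2]) readable
    String.ofList (PySem.Chars.join [] readable)
  else text

-- ===== PORT B =====
-- f-string "## Section {count}: {line[3:]}" at char-list level
def pvLineB (i : Int) (line : List Char) : List Char :=
  ['#', '#', ' ', 'S', 'e', 'c', 't', 'i', 'o', 'n', ' '] ++ PySem.Int.toChars i
    ++ [':', ' '] ++ line.drop 3

-- the loop over lines[1:] threading the counter
def pvGoB (n : Int) : List (List Char) → List (List Char)
  | [] => []
  | line :: ls =>
    if PySem.Chars.startswith line ['#', '#', ' '] then
      pvLineB n line :: pvGoB (n + 1) ls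
    else
      line :: pvGoB n ls

def add_reading_order_py_alt (text : String) : String :=
  let lines := PySem.Chars.splitOn text.toList ['\n']
  -- lines[0]: splitOn never returns [], so headD is exact here
  String.ofList (PySem.Chars.join ['\n'] (lines.headD [] :: pvGoB 1 (lines.drop 1)))

-- ===== PRECONDITION & SPEC =====
def Spec_add_reading_order_py (text : String) (out : String) : Prop := out = add_reading_order_py_alt text
instance (text : String) (out : String) : Decidable (Spec_add_reading_order_py text out) := by unfold Spec_add_reading_order_py; infer_instance

-- ===== CLAIM (what is proved, stated in full; the proofs are below) =====
def Claim_equal_add_reading_order_py : Prop := ∀ (text : String), Dom_add_reading_order_py text → Spec_add_reading_order_py text (add_reading_order_py text)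

-- ===== LEMMAS AND PROOFS =====

-- clean structural model of Python str.split(sep) for nonempty sep
def pvSplit (sep : List Char) : List Char → List (List Char)
  | [] => [[]]
  | c :: rest =>
    if sep.isPrefixOf (c :: rest) ∧ sep ≠ [] then
      [] :: pvSplit sep ((c :: rest).drop sep.length)
    else
      (pvSplit sep rest).modifyHead (c :: ·)
termination_by l => l.length
decreasing_by
  · rcases sep with _ | ⟨s, ss⟩
    · simp_all
    · simp only [List.length_drop, List.length_cons]; omega
  · simp

lemma pvSplit_ne_nil (sep l) : pvSplit sep l ≠ [] := by
  fun_induction pvSplit sep l with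
  | case1 => simp
  | case2 => simp
  | case3 c rest h ih =>
    rcases hS : pvSplit sep rest with _ | ⟨h0, tl⟩
    · exact absurd hS ih
    · simp

lemma pvSplit_singleton (sep l x) (h : pvSplit sep l = [x]) : x = l := by
  fun_induction pvSplit sep l generalizing x with
  | case1 => simp_all
  | case2 c rest hpre ih =>
    have := pvSplit_ne_nil sep ((c :: rest).drop sep.length)
    rcases hS : pvSplit sep ((c :: rest).drop sep.length) with _ | ⟨h0, tl⟩
    · exact absurd hS this
    · rw [hS] at h; simp at h
  | case3 c rest hpre ih =>
    have hne := pvSplit_ne_nil sep rest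
    rcases hS : pvSplit sep rest with _ | ⟨h0, tl⟩
    · exact absurd hS hne
    · rw [hS] at h
      simp only [List.modifyHead, List.cons.injEq] at h
      have h0r : h0 = rest := ih h0 (by rw [hS, h.2])
      simp [← h.1, h0r]

-- splitOn.go with enough fuel computes pvSplit
lemma pvGo_eq (sep : List Char) (hsep : sep ≠ []) :
    ∀ (fuel : Nat) (l cur : List Char) (hacc : List (List Char)),
      l.length < fuel →
      PySem.Chars.splitOn.go sep fuel l cur hacc =
        hacc.reverse ++ (pvSplit sep l).modifyHead (cur.reverse ++ ·) := by
  intro fuel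
  induction fuel with
  | zero => intro l cur hacc h; omega
  | succ f ih =>
    intro l cur hacc h
    rcases l with _ | ⟨c, rest⟩
    · simp [PySem.Chars.splitOn.go, pvSplit, List.modifyHead]
    · by_cases hp : sep.isPrefixOf (c :: rest) = true
      · have hstep : PySem.Chars.splitOn.go sep (f+1) (c :: rest) cur hacc =
            PySem.Chars.splitOn.go sep f ((c::rest).drop sep.length) [] (cur.reverse :: hacc) := by
          simp [PySem.Chars.splitOn.go, hp]
        have hlen : ((c::rest).drop sep.length).length < f := by
          rcases sep with _ | ⟨s, ss⟩
          · exact absurd rfl hsep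
          · simp only [List.length_drop, List.length_cons] at *; omega
        rw [hstep, ih _ _ _ hlen]
        rw [pvSplit]
        simp only [hp, hsep, ne_eq, not_false_eq_true, and_self, if_true, List.modifyHead,
          List.reverse_nil, List.nil_append, List.reverse_cons, List.append_assoc,
          List.cons_append, List.singleton_append]
        rcases pvSplit sep ((c :: rest).drop sep.length) with _ | ⟨x, xs⟩ <;> simp
      · have hstep : PySem.Chars.splitOn.go sep (f+1) (c :: rest) cur hacc =
            PySem.Chars.splitOn.go sep f rest (c :: cur) hacc := by
          simp [PySem.Chars.splitOn.go, hp]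
        have hlen : rest.length < f := by simp only [List.length_cons] at h; omega
        rw [hstep, ih _ _ _ hlen]
        rw [pvSplit]
        rcases hS : pvSplit sep rest with _ | ⟨h0, tl⟩
        · exact absurd hS (pvSplit_ne_nil sep rest)
        · simp [hp, List.modifyHead]

lemma splitOn_eq_pvSplit (l sep : List Char) (hsep : sep ≠ []) :
    PySem.Chars.splitOn l sep = pvSplit sep l := by
  rw [PySem.Chars.splitOn, pvGo_eq sep hsep _ _ _ _ (by omega)]
  rcases hS : pvSplit sep l with _ | ⟨h0, tl⟩
  · exact absurd hS (pvSplit_ne_nil sep l)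
  · simp [List.modifyHead]

-- the common model: scan the text, replacing the i-th occurrence of "\n## " by "\n## Section i: "
def pvProc (n : Int) : List Char → List Char
  | [] => []
  | c :: rest =>
    if ['\n', '#', '#', ' '].isPrefixOf (c :: rest) then
      ['\n', '#', '#', ' ', 'S', 'e', 'c', 't', 'i', 'o', 'n', ' '] ++ PySem.Int.toChars n
        ++ [':', ' '] ++ pvProc (n + 1) ((c :: rest).drop 4)
    else
      c :: pvProc n rest
termination_by l => l.length
decreasing_by
  · simp only [List.length_drop, List.length_cons]; omega
  · simp

lemma pvSplit_cons_nl (r : List Char) :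
    pvSplit ['\n'] ('\n' :: r) = [] :: pvSplit ['\n'] r := by
  rw [pvSplit]; simp [List.isPrefixOf]

lemma pvSplit_cons_ne (c : Char) (hc : c ≠ '\n') (r : List Char) :
    pvSplit ['\n'] (c :: r) = (pvSplit ['\n'] r).modifyHead (c :: ·) := by
  rw [pvSplit]; simp [List.isPrefixOf, (Ne.symm hc)]

lemma mainA (l : List Char) (n : Int) :
    (pvSplit ['\n', '#', '#', ' '] l).headD [] ++
      (((PySem.List.enumerate ((pvSplit ['\n', '#', '#', ' '] l).drop 1) n).map
        (fun p => pvHeaderA p.1 p.2)).flatten) = pvProc n l := by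
  fun_induction pvProc n l with
  | case1 n => simp [pvSplit, PySem.List.enumerate]
  | case2 n c rest hp ih =>
    rw [pvSplit, if_pos ⟨hp, by decide⟩]
    have h4 : (['\n', '#', '#', ' '] : List Char).length = 4 := rfl
    rw [h4]
    rcases hS : pvSplit ['\n', '#', '#', ' '] ((c :: rest).drop 4) with _ | ⟨h0, tl⟩
    · exact absurd hS (pvSplit_ne_nil _ _)
    · rw [hS] at ih
      simp only [List.headD_cons, List.drop_one, List.tail_cons, List.nil_append,
        PySem.List.enumerate_cons, List.map_cons, List.flatten_cons, pvHeaderA,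
        List.append_assoc, List.cons_append, List.nil_append] at ih ⊢
      rw [ih]
  | case3 n c rest hp ih =>
    rw [pvSplit, if_neg (by simp [hp])]
    rcases hS : pvSplit ['\n', '#', '#', ' '] rest with _ | ⟨h0, tl⟩
    · exact absurd hS (pvSplit_ne_nil _ _)
    · rw [hS] at ih
      simp only [List.modifyHead_cons, List.headD_cons, List.drop_one, List.tail_cons,
        List.cons_append] at ih ⊢
      rw [ih]

-- first line of the line-split starts with p iff the text does (p contains no newline)
lemma pvHead_startswith (l p : List Char) (hp : '\n' ∉ p) :
    p.isPrefixOf ((pvSplit ['\n'] l).headD []) = p.isPrefixOf l := by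
  induction l generalizing p with
  | nil => simp [pvSplit]
  | cons c r ih =>
    by_cases hc : c = '\n'
    · subst hc
      rw [pvSplit_cons_nl]
      rcases p with _ | ⟨p0, p'⟩
      · simp [List.isPrefixOf]
      · have hp0 : p0 ≠ '\n' := by intro h; exact hp (h ▸ List.mem_cons_self)
        simp only [List.headD_nil, List.isPrefixOf]
        simp
        exact fun h => absurd h hp0
    · rw [pvSplit_cons_ne c hc]
      rcases hS : pvSplit ['\n'] r with _ | ⟨h0, tl⟩
      · exact absurd hS (pvSplit_ne_nil _ _)
      · rcases p with _ | ⟨p0, p'⟩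
        · simp [List.isPrefixOf]
        · have hp' : '\n' ∉ p' := fun h => hp (List.mem_cons_of_mem _ h)
          have := ih p' hp'
          rw [hS] at this
          simp only [List.modifyHead, List.headD_cons, List.isPrefixOf_cons₂] at this ⊢
          rw [this]

-- joining B's processed lines, unrolled
def pvJT (n : Int) : List (List Char) → List Char
  | [] => []
  | line :: ls =>
    if PySem.Chars.startswith line ['#', '#', ' '] then
      '\n' :: (pvLineB n line ++ pvJT (n + 1) ls)
    else
      '\n' :: (line ++ pvJT n ls)

lemma join_goB (l0 : List Char) (n : Int) (ls : List (List Char)) :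
    PySem.Chars.join ['\n'] (l0 :: pvGoB n ls) = l0 ++ pvJT n ls := by
  induction ls generalizing l0 n with
  | nil => simp [pvGoB, pvJT, PySem.Chars.join_singleton]
  | cons line ls ih =>
    by_cases hsw : PySem.Chars.startswith line ['#', '#', ' '] = true
    · simp only [pvGoB, pvJT, hsw, if_true]
      rw [PySem.Chars.join_cons_cons, ih]
      simp
    · simp only [pvGoB, pvJT, hsw, if_false, Bool.false_eq_true]
      rw [PySem.Chars.join_cons_cons, ih]
      simp

lemma mainB (l : List Char) (n : Int) :
    (pvSplit ['\n'] l).headD [] ++ pvJT n ((pvSplit ['\n'] l).drop 1) = pvProc n l := by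
  fun_induction pvProc n l with
  | case1 n => simp [pvSplit, pvJT]
  | case2 n c rest hp ih =>
    rw [List.isPrefixOf_iff_prefix] at hp
    obtain ⟨t, ht⟩ := hp
    have h1 : '\n' :: '#' :: '#' :: ' ' :: t = c :: rest := by simpa using ht
    injection h1 with e1 e2
    subst e2
    subst c
    rcases hS : pvSplit ['\n'] t with _ | ⟨h0, tl⟩
    · exact absurd hS (pvSplit_ne_nil _ _)
    · have hdrop : (('\n' :: '#' :: '#' :: ' ' :: t).drop 4) = t := rfl
      rw [hdrop, hS] at ih
      rw [pvSplit_cons_nl, pvSplit_cons_ne '#' (by decide), pvSplit_cons_ne '#' (by decide),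
        pvSplit_cons_ne ' ' (by decide), hS]
      simp only [List.modifyHead, List.headD_cons, List.drop_one, List.tail_cons,
        List.nil_append] at ih ⊢
      simp only [pvJT, PySem.Chars.startswith, List.isPrefixOf_cons₂,
        List.isPrefixOf, beq_self_eq_true, Bool.and_self, if_true]
      simp only [pvLineB, List.drop_succ_cons, List.drop_zero, hdrop, List.append_assoc]
      rw [ih]
      rfl
  | case3 n c rest hp ih =>
    by_cases hc : c = '\n'
    · subst hc
      have hps : ¬ (['#', '#', ' '] : List Char).isPrefixOf rest = true := by
        intro hcon
        exact hp (by simpa [List.isPrefixOf_cons₂] using hcon)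
      rcases hS : pvSplit ['\n'] rest with _ | ⟨h0, tl⟩
      · exact absurd hS (pvSplit_ne_nil _ _)
      · have hh : (['#', '#', ' '] : List Char).isPrefixOf h0 = false := by
          have := pvHead_startswith rest ['#', '#', ' '] (by decide)
          rw [hS] at this
          simp only [List.headD_cons] at this
          rw [this]
          exact eq_false_of_ne_true hps
        rw [hS] at ih
        rw [pvSplit_cons_nl, hS]
        simp only [List.headD_cons, List.drop_one, List.tail_cons, List.nil_append] at ih ⊢
        simp only [pvJT, PySem.Chars.startswith, hh, Bool.false_eq_true, if_false]
        rw [ih]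
    · rcases hS : pvSplit ['\n'] rest with _ | ⟨h0, tl⟩
      · exact absurd hS (pvSplit_ne_nil _ _)
      · rw [hS] at ih
        rw [pvSplit_cons_ne c hc, hS]
        simp only [List.modifyHead, List.headD_cons, List.drop_one, List.tail_cons,
          List.cons_append] at ih ⊢
        rw [ih]

lemma join_nil_flatten (ls : List (List Char)) :
    PySem.Chars.join [] ls = ls.flatten := by
  induction ls with
  | nil => simp [PySem.Chars.join_nil]
  | cons a rest ih =>
    rcases rest with _ | ⟨b, t⟩
    · simp [PySem.Chars.join_singleton]
    · rw [PySem.Chars.join_cons_cons, ih]; simp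

-- ===== VERDICT (by name: the statement is the Claim_ definition above) =====
theorem add_reading_order_py_spec : Claim_equal_add_reading_order_py := by
  intro text _
  unfold Spec_add_reading_order_py
  have hB : add_reading_order_py_alt text = String.ofList (pvProc 1 text.toList) := by
    unfold add_reading_order_py_alt
    rw [splitOn_eq_pvSplit _ _ (by decide)]
    rcases hS : pvSplit ['\n'] text.toList with _ | ⟨h0, tl⟩
    · exact absurd hS (pvSplit_ne_nil _ _)
    · have := mainB text.toList 1
      rw [hS] at this
      simp only [List.headD_cons, List.drop_one, List.tail_cons] at this ⊢
      rw [join_goB, this]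
  rw [hB]
  unfold add_reading_order_py
  rw [splitOn_eq_pvSplit _ _ (by decide)]
  by_cases hlen : (pvSplit ['\n', '#', '#', ' '] text.toList).length > 1
  · simp only [hlen, if_true]
    rw [PySem.List.foldl_append_singleton_eq_map, join_nil_flatten]
    have := mainA text.toList 1
    rcases hS : pvSplit ['\n', '#', '#', ' '] text.toList with _ | ⟨h0, tl⟩
    · exact absurd hS (pvSplit_ne_nil _ _)
    · rw [hS] at this
      simp only [List.headD_cons, List.drop_one, List.tail_cons] at this ⊢
      simp only [List.flatten_cons, List.singleton_append]
      rw [this]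
  · simp only [hlen, if_false]
    rcases hS : pvSplit ['\n', '#', '#', ' '] text.toList with _ | ⟨h0, tl⟩
    · exact absurd hS (pvSplit_ne_nil _ _)
    · have htl : tl = [] := by
        rw [hS] at hlen
        simp only [List.length_cons, gt_iff_lt, not_lt] at hlen
        have h0len : tl.length = 0 := by omega
        exact List.length_eq_zero_iff.mp h0len
      subst htl
      have hx : h0 = text.toList := pvSplit_singleton _ _ _ hS
      have := mainA text.toList 1
      rw [hS] at this
      simp only [List.headD_cons, List.drop_one, List.tail_cons, PySem.List.enumerate,
        List.map_nil, List.flatten_nil, List.append_nil] at this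
      rw [← this, hx, String.ofList_toList]
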